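-- pv_equiv track=rewrite | github.com/sawyerseitz/CS4750-hw4 | heuristic.py | check_diagonal_up
-- ===== SOURCE A (Python) =====
-- BOARD_DIM = 6
--
-- EMPTY_CHAR = 'E'
--
-- def check_diagonal_up(x, y, board, player_char, opp_char):
--
-- 	coordinate_list = [(x,y)]
-- 	diagonal_char_count = 1
-- 	empty_space_count = 0
--
-- 	# LEFT AND DOWN
-- 	i, j = x, y
-- 	counter = 0
-- 	while(j != BOARD_DIM-1 and i != 0):
-- 		counter += 1
-- 		current_char = board[i-1][j+1]
--
-- 		if current_char == player_char:
-- 			diagonal_char_count += 1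
-- 			coordinate_list.append((i,j))
-- 			i-=1
-- 			j+=1
-- 			continue
--
-- 		elif current_char == opp_char:
-- 			break
--
-- 		elif current_char == EMPTY_CHAR:
-- 			empty_space_count += 1
-- 			break
--
-- 	# Checking Right and Up
-- 	i, j = x,y
--
-- 	while(j != 0 and i != BOARD_DIM-1):
-- 		counter += 1
-- 		current_char = board[i+1][j-1]
--
-- 		if current_char == player_char:
-- 			diagonal_char_count += 1
-- 			coordinate_list.append((i,j))
-- 			i+=1
-- 			j-=1
-- 			continue
--
-- 		elif current_char == opp_char:
-- 			break
--
-- 		elif current_char == EMPTY_CHAR: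
-- 			empty_space_count += 1
-- 			break
--
-- 	# Returning the appropriate case numbers and coordinate_list
-- 	coordinate_list = sorted(coordinate_list, key=lambda coord: coord[0])
--
-- 	if diagonal_char_count >= 4:
-- 		return 4, coordinate_list, counter
-- 	elif diagonal_char_count <= 1 or empty_space_count == 0:
-- 		coordinate_list = []
-- 		return 0, coordinate_list, counter
--
-- 	elif diagonal_char_count == 2:
-- 		return 3, coordinate_list, counter
--
-- 	elif diagonal_char_count == 3:
-- 		if empty_space_count == 1:
-- 			return 2, coordinate_list, counter
-- 		elif empty_space_count == 2:
-- 			return 1, coordinate_list, counter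
-- ===== SOURCE B (Python) =====
-- BOARD_DIM = 6
--
-- EMPTY_CHAR = 'E'
--
-- def _walk(board, player_char, opp_char, di, dj, i, j):
--     """Player-run along direction (di, dj) from (i, j): returns
--     (run, empties, steps, coords); coords are the pre-step positions
--     (so the origin is re-added on the first match, as the caller expects)."""
--     if not ((j != BOARD_DIM - 1 if dj > 0 else j != 0)
--             and (i != 0 if di < 0 else i != BOARD_DIM - 1)):
--         return 0, 0, 0, []
--     cell = board[i + di][j + dj]
--     if cell != player_char:
--         return 0, 1 if (cell != opp_char and cell == EMPTY_CHAR) else 0, 1, []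
--     run, empties, steps, coords = _walk(board, player_char, opp_char, di, dj, i + di, j + dj)
--     return run + 1, empties, steps + 1, [(i, j)] + coords
--
-- def check_diagonal_up(x, y, board, player_char, opp_char):
--     r1, e1, s1, c1 = _walk(board, player_char, opp_char, -1, 1, x, y)
--     r2, e2, s2, c2 = _walk(board, player_char, opp_char, 1, -1, x, y)
--     diagonal_char_count = 1 + r1 + r2
--     empty_space_count = e1 + e2
--     counter = s1 + s2
--     coordinate_list = sorted([(x, y)] + c1 + c2, key=lambda coord: coord[0])
--     if diagonal_char_count >= 4:
--         return 4, coordinate_list, counter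
--     if diagonal_char_count <= 1 or empty_space_count == 0:
--         return 0, [], counter
--     if diagonal_char_count == 2:
--         return 3, coordinate_list, counter
--     return (2, coordinate_list, counter) if empty_space_count == 1 else (1, coordinate_list, counter)
-- ===== Notes on version B (the rewrite author's own statement) =====
-- stated objective: alternative
-- what changed: B replaces A's two duplicated stateful while loops (shared mutable counters with break/continue) by a single recursive direction-parametric walk helper called once per diagonal, combining the per-direction (run, empties, steps, coords) results arithmetically; B stops on any non-player cell where A would loop forever on a foreign piece.
import Mathlib
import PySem

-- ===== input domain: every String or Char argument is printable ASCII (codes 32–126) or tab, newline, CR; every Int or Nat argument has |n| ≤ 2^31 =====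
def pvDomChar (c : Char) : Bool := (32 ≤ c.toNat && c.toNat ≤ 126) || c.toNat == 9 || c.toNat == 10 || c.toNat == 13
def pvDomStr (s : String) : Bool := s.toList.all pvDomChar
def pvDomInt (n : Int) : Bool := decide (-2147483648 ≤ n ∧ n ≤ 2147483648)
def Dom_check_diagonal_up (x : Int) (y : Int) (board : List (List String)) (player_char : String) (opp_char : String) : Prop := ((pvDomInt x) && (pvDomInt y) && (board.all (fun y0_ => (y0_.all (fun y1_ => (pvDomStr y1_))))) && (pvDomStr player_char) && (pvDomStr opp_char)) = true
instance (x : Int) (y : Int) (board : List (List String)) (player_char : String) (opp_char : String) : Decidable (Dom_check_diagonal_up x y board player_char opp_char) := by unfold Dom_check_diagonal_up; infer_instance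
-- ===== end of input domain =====

-- B replaces A's two duplicated stateful while loops (shared mutable counters, break/continue) by one
-- recursive direction-parametric walk helper whose per-direction results are combined arithmetically
-- (objective: alternative decomposition; same cost).

-- board[i][j] for A's reads; exact where Pre_ holds (the read cell is defined there)
def cellAt (board : List (List String)) (i j : Int) : String :=
  PySem.List.pyGetD (PySem.List.pyGetD board i []) j ""

-- ===== PORT A =====
-- Python's first while loop ("LEFT AND DOWN"); fuel 8 exceeds the ≤ 7 iterations possible under
-- Pre_; the last branch is where the Python loop would spin forever (excluded by Pre_).
def loopUL (board : List (List String)) (player_char opp_char : String) :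
    Nat → Int → Int → Int → Int → Int → List (Int × Int) → Int × Int × Int × List (Int × Int)
  | 0, _, _, counter, dcc, esc, coords => (counter, dcc, esc, coords)
  | fuel+1, i, j, counter, dcc, esc, coords =>
    if j ≠ 5 ∧ i ≠ 0 then
      let c := cellAt board (i-1) (j+1)
      if c = player_char then
        loopUL board player_char opp_char fuel (i-1) (j+1) (counter+1) (dcc+1) esc (coords ++ [(i, j)])
      else if c = opp_char then (counter+1, dcc, esc, coords)
      else if c = "E" then (counter+1, dcc, esc+1, coords)
      else loopUL board player_char opp_char fuel i j (counter+1) dcc esc coords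
    else (counter, dcc, esc, coords)

-- Python's second while loop ("Checking Right and Up")
def loopDR (board : List (List String)) (player_char opp_char : String) :
    Nat → Int → Int → Int → Int → Int → List (Int × Int) → Int × Int × Int × List (Int × Int)
  | 0, _, _, counter, dcc, esc, coords => (counter, dcc, esc, coords)
  | fuel+1, i, j, counter, dcc, esc, coords =>
    if j ≠ 0 ∧ i ≠ 5 then
      let c := cellAt board (i+1) (j-1)
      if c = player_char then
        loopDR board player_char opp_char fuel (i+1) (j-1) (counter+1) (dcc+1) esc (coords ++ [(i, j)])
      else if c = opp_char then (counter+1, dcc, esc, coords)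
      else if c = "E" then (counter+1, dcc, esc+1, coords)
      else loopDR board player_char opp_char fuel i j (counter+1) dcc esc coords
    else (counter, dcc, esc, coords)

def check_diagonal_up (x : Int) (y : Int) (board : List (List String)) (player_char : String) (opp_char : String) : Int × (List (Int × Int)) × Int :=
  let s1 := loopUL board player_char opp_char 8 x y 0 1 0 [(x, y)]
  let s2 := loopDR board player_char opp_char 8 x y s1.1 s1.2.1 s1.2.2.1 s1.2.2.2
  let counter := s2.1
  let diagonal_char_count := s2.2.1
  let empty_space_count := s2.2.2.1
  let coordinate_list := PySem.List.sorted s2.2.2.2 (fun coord => coord.1) false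
  if diagonal_char_count ≥ 4 then (4, coordinate_list, counter)
  else if diagonal_char_count ≤ 1 ∨ empty_space_count = 0 then (0, ([] : List (Int × Int)), counter)
  else if diagonal_char_count = 2 then (3, coordinate_list, counter)
  else if diagonal_char_count = 3 then
    (if empty_space_count = 1 then (2, coordinate_list, counter)
     else if empty_space_count = 2 then (1, coordinate_list, counter)
     else (0, ([] : List (Int × Int)), counter))  -- unreachable under Pre_ (empty_space_count ∈ {1,2} here; Python falls off returning None)
  else (0, ([] : List (Int × Int)), counter)  -- unreachable: diagonal_char_count is an integer

-- ===== PORT B =====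
-- board[i][j] for B's reads; exact where Pre_ holds
def cellB (board : List (List String)) (i j : Int) : String :=
  PySem.List.pyGetD (PySem.List.pyGetD board i []) j ""

-- Source B's _walk: one recursive walk for both directions, returning (run, empties, steps, coords);
-- fuel 8 exceeds the recursion depth possible under Pre_.
def walkB (board : List (List String)) (player_char opp_char : String) :
    Nat → Int → Int → Int → Int → Int × Int × Int × List (Int × Int)
  | 0, _, _, _, _ => (0, 0, 0, [])
  | fuel+1, di, dj, i, j =>
    if (if dj > 0 then j ≠ 5 else j ≠ 0) ∧ (if di < 0 then i ≠ 0 else i ≠ 5) then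
      if cellB board (i + di) (j + dj) ≠ player_char then
        (0, if cellB board (i + di) (j + dj) ≠ opp_char ∧ cellB board (i + di) (j + dj) = "E" then 1 else 0, 1, [])
      else
        ((walkB board player_char opp_char fuel di dj (i + di) (j + dj)).1 + 1,
         (walkB board player_char opp_char fuel di dj (i + di) (j + dj)).2.1,
         (walkB board player_char opp_char fuel di dj (i + di) (j + dj)).2.2.1 + 1,
         (i, j) :: (walkB board player_char opp_char fuel di dj (i + di) (j + dj)).2.2.2)
    else (0, 0, 0, [])

def check_diagonal_up_alt (x : Int) (y : Int) (board : List (List String)) (player_char : String) (opp_char : String) : Int × (List (Int × Int)) × Int :=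
  let w1 := walkB board player_char opp_char 8 (-1) 1 x y
  let w2 := walkB board player_char opp_char 8 1 (-1) x y
  let diagonal_char_count := 1 + w1.1 + w2.1
  let empty_space_count := w1.2.1 + w2.2.1
  let counter := w1.2.2.1 + w2.2.2.1
  let coordinate_list := PySem.List.sorted ([(x, y)] ++ w1.2.2.2 ++ w2.2.2.2) (fun coord => coord.1) false
  if diagonal_char_count ≥ 4 then (4, coordinate_list, counter)
  else if diagonal_char_count ≤ 1 ∨ empty_space_count = 0 then (0, ([] : List (Int × Int)), counter)
  else if diagonal_char_count = 2 then (3, coordinate_list, counter)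
  else if empty_space_count = 1 then (2, coordinate_list, counter)
  else (1, coordinate_list, counter)

-- ===== PRECONDITION & SPEC =====
-- board[i][j] as an Option (none exactly where Python raises IndexError)
def ocellAt (board : List (List String)) (i j : Int) : Option String :=
  (PySem.List.pyGet? board i).bind (fun row => PySem.List.pyGet? row j)

-- the first cell a walk reads exists and stops it at once (opponent's piece or 'E', not the player's)
def blockerOk (oc : Option String) (player_char opp_char : String) : Bool :=
  match oc with
  | none => false
  | some c => (c != player_char) && (c == opp_char || c == "E")

-- the two diagonal rays of a proper 6×6 board, as cell lists
def upCells (x y : Int) (board : List (List String)) : List String :=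
  (PySem.List.pyRange 1 (min x (5 - y) + 1) 1).map (fun k => cellAt board (x - k) (y + k))

def downCells (x y : Int) (board : List (List String)) : List String :=
  (PySem.List.pyRange 1 (min (5 - x) y + 1) 1).map (fun k => cellAt board (x + k) (y - k))

-- on a ray, the first cell that is not the player's (if any) is the opponent's or 'E'
def okRay (cells : List String) (player_char opp_char : String) : Bool :=
  match cells.dropWhile (fun c => c == player_char) with
  | [] => true
  | c :: _ => c == opp_char || c == "E"

-- Pre_ is exactly the inputs on which A's loops can be certified in closed form to terminate without
-- raising: either each loop is idle or stopped by its very first cell (any board, any coordinates), or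
-- the board is a proper 6×6 one with in-range coordinates and on each scanned diagonal the first
-- non-player cell (if any) is the opponent's piece or 'E'.  Excluded (one comment, per the rules):
-- walks that match the player more than once outside a proper 6×6 board — there A can still return via
-- Python's negative-index wraparound, and B returns the same value, but the walk has left the game's
-- natural 6×6 domain.  On any other cell on a ray A's while loop never terminates.
def Pre_check_diagonal_up (x : Int) (y : Int) (board : List (List String)) (player_char : String) (opp_char : String) : Prop :=
  ((¬(y ≠ 5 ∧ x ≠ 0) ∨ blockerOk (ocellAt board (x-1) (y+1)) player_char opp_char = true)
    ∧ (¬(y ≠ 0 ∧ x ≠ 5) ∨ blockerOk (ocellAt board (x+1) (y-1)) player_char opp_char = true))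
  ∨ (0 ≤ x ∧ x ≤ 5 ∧ 0 ≤ y ∧ y ≤ 5 ∧ board.length = 6 ∧ (∀ r ∈ board, r.length = 6)
      ∧ okRay (upCells x y board) player_char opp_char = true
      ∧ okRay (downCells x y board) player_char opp_char = true)

instance (x : Int) (y : Int) (board : List (List String)) (player_char : String) (opp_char : String) : Decidable (Pre_check_diagonal_up x y board player_char opp_char) := by
  unfold Pre_check_diagonal_up; infer_instance

def pvWitness_check_diagonal_up : Int × Int × List (List String) × String × String :=
  (2, 2, [["E","E","E","E","E","E"], ["E","E","E","E","E","E"], ["E","E","X","E","E","E"],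
          ["E","E","E","E","E","E"], ["E","E","E","E","E","E"], ["E","E","E","E","E","E"]], "X", "O")

def Spec_check_diagonal_up (x : Int) (y : Int) (board : List (List String)) (player_char : String) (opp_char : String) (out : Int × (List (Int × Int)) × Int) : Prop := out = check_diagonal_up_alt x y board player_char opp_char
instance (x : Int) (y : Int) (board : List (List String)) (player_char : String) (opp_char : String) (out : Int × (List (Int × Int)) × Int) : Decidable (Spec_check_diagonal_up x y board player_char opp_char out) := by unfold Spec_check_diagonal_up; infer_instance

-- ===== CLAIM (what is proved, stated in full; the proofs are below) =====
def Claim_equal_check_diagonal_up : Prop := ∀ (x : Int) (y : Int) (board : List (List String)) (player_char : String) (opp_char : String), Dom_check_diagonal_up x y board player_char opp_char → Pre_check_diagonal_up x y board player_char opp_char → Spec_check_diagonal_up x y board player_char opp_char (check_diagonal_up x y board player_char opp_char)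

-- ===== LEMMAS AND PROOFS =====

theorem check_diagonal_up_witness_ok :
    Dom_check_diagonal_up pvWitness_check_diagonal_up.1 pvWitness_check_diagonal_up.2.1 pvWitness_check_diagonal_up.2.2.1 pvWitness_check_diagonal_up.2.2.2.1 pvWitness_check_diagonal_up.2.2.2.2
    ∧ Pre_check_diagonal_up pvWitness_check_diagonal_up.1 pvWitness_check_diagonal_up.2.1 pvWitness_check_diagonal_up.2.2.1 pvWitness_check_diagonal_up.2.2.2.1 pvWitness_check_diagonal_up.2.2.2.2 := by
  decide

lemma cellAt_congr (board : List (List String)) {a a' b b' : Int} (h1 : a = a') (h2 : b = b') :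
    cellAt board a b = cellAt board a' b' := by rw [h1, h2]

lemma cellB_eq_cellAt (board : List (List String)) (i j : Int) : cellB board i j = cellAt board i j := rfl

lemma cellAt_of_ocellAt (board : List (List String)) (i j : Int) (c : String)
    (h : ocellAt board i j = some c) : cellAt board i j = c := by
  unfold ocellAt at h
  have hrep : cellAt board i j = (PySem.List.pyGet? ((PySem.List.pyGet? board i).getD []) j).getD "" := rfl
  cases hb : PySem.List.pyGet? board i with
  | none => rw [hb] at h; simp at h
  | some row =>
    rw [hb] at h
    simp only [Option.bind_some] at h
    rw [hrep, hb]
    simp [h]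

lemma blockerOk_spec (oc : Option String) (p o : String) (h : blockerOk oc p o = true) :
    ∃ c, oc = some c ∧ c ≠ p ∧ (c = o ∨ c = "E") := by
  cases oc with
  | none => simp [blockerOk] at h
  | some c =>
    refine ⟨c, rfl, ?_⟩
    simpa [blockerOk, Bool.and_eq_true, Bool.or_eq_true] using h

-- single-unfolding lemmas for A's loops
lemma loopUL_idle (board : List (List String)) (p o : String) (f : Nat) (i j counter dcc esc : Int)
    (coords : List (Int × Int)) (h : ¬(j ≠ 5 ∧ i ≠ 0)) :
    loopUL board p o (f+1) i j counter dcc esc coords = (counter, dcc, esc, coords) := by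
  rw [loopUL, if_neg h]

lemma loopDR_idle (board : List (List String)) (p o : String) (f : Nat) (i j counter dcc esc : Int)
    (coords : List (Int × Int)) (h : ¬(j ≠ 0 ∧ i ≠ 5)) :
    loopDR board p o (f+1) i j counter dcc esc coords = (counter, dcc, esc, coords) := by
  rw [loopDR, if_neg h]

lemma loopUL_blocker (board : List (List String)) (p o : String) (f : Nat) (i j counter dcc esc : Int)
    (coords : List (Int × Int)) (c : String) (hg : j ≠ 5 ∧ i ≠ 0)
    (hcell : cellAt board (i-1) (j+1) = c) (hp : c ≠ p) (hblk : c = o ∨ c = "E") :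
    loopUL board p o (f+1) i j counter dcc esc coords
      = (counter + 1, dcc, esc + (if c ≠ o ∧ c = "E" then 1 else 0), coords) := by
  rw [loopUL, if_pos hg]
  simp only [hcell]
  rw [if_neg hp]
  by_cases ho : c = o
  · rw [if_pos ho]
    simp [ho]
  · have hE : c = "E" := by tauto
    have hne : ¬ ("E" : String) = o := by rw [← hE]; exact ho
    rw [if_neg ho, if_pos hE]
    simp [hE, hne]

lemma loopDR_blocker (board : List (List String)) (p o : String) (f : Nat) (i j counter dcc esc : Int)
    (coords : List (Int × Int)) (c : String) (hg : j ≠ 0 ∧ i ≠ 5)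
    (hcell : cellAt board (i+1) (j-1) = c) (hp : c ≠ p) (hblk : c = o ∨ c = "E") :
    loopDR board p o (f+1) i j counter dcc esc coords
      = (counter + 1, dcc, esc + (if c ≠ o ∧ c = "E" then 1 else 0), coords) := by
  rw [loopDR, if_pos hg]
  simp only [hcell]
  rw [if_neg hp]
  by_cases ho : c = o
  · rw [if_pos ho]
    simp [ho]
  · have hE : c = "E" := by tauto
    have hne : ¬ ("E" : String) = o := by rw [← hE]; exact ho
    rw [if_neg ho, if_pos hE]
    simp [hE, hne]

-- single-unfolding lemmas for B's walk, direction (-1, 1)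
lemma walkB_UL_idle (board : List (List String)) (p o : String) (f : Nat) (i j : Int)
    (h : ¬(j ≠ 5 ∧ i ≠ 0)) :
    walkB board p o (f+1) (-1) 1 i j = (0, 0, 0, []) := by
  rw [walkB]
  simp only [show (if (1:Int) > 0 then j ≠ 5 else j ≠ 0) = (j ≠ 5) from if_pos (by norm_num),
             show (if (-1:Int) < 0 then i ≠ 0 else i ≠ 5) = (i ≠ 0) from if_pos (by norm_num)]
  rw [if_neg h]

lemma walkB_UL_blocker (board : List (List String)) (p o : String) (f : Nat) (i j : Int) (c : String)
    (hg : j ≠ 5 ∧ i ≠ 0) (hcell : cellB board (i + -1) (j + 1) = c) (hp : c ≠ p) :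
    walkB board p o (f+1) (-1) 1 i j = (0, if c ≠ o ∧ c = "E" then 1 else 0, 1, []) := by
  rw [walkB]
  simp only [show (if (1:Int) > 0 then j ≠ 5 else j ≠ 0) = (j ≠ 5) from if_pos (by norm_num),
             show (if (-1:Int) < 0 then i ≠ 0 else i ≠ 5) = (i ≠ 0) from if_pos (by norm_num)]
  rw [if_pos hg]
  simp only [hcell]
  rw [if_pos hp]

lemma walkB_UL_step (board : List (List String)) (p o : String) (f : Nat) (i j : Int)
    (hg : j ≠ 5 ∧ i ≠ 0) (hcell : cellB board (i + -1) (j + 1) = p) :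
    walkB board p o (f+1) (-1) 1 i j
      = ((walkB board p o f (-1) 1 (i-1) (j+1)).1 + 1,
         (walkB board p o f (-1) 1 (i-1) (j+1)).2.1,
         (walkB board p o f (-1) 1 (i-1) (j+1)).2.2.1 + 1,
         (i, j) :: (walkB board p o f (-1) 1 (i-1) (j+1)).2.2.2) := by
  rw [walkB]
  simp only [show (if (1:Int) > 0 then j ≠ 5 else j ≠ 0) = (j ≠ 5) from if_pos (by norm_num),
             show (if (-1:Int) < 0 then i ≠ 0 else i ≠ 5) = (i ≠ 0) from if_pos (by norm_num)]
  rw [if_pos hg]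
  simp only [hcell]
  rw [if_neg (not_not_intro rfl)]
  rw [show i + (-1 : Int) = i - 1 by ring]

-- single-unfolding lemmas for B's walk, direction (1, -1)
lemma walkB_DR_idle (board : List (List String)) (p o : String) (f : Nat) (i j : Int)
    (h : ¬(j ≠ 0 ∧ i ≠ 5)) :
    walkB board p o (f+1) 1 (-1) i j = (0, 0, 0, []) := by
  rw [walkB]
  simp only [show (if (-1:Int) > 0 then j ≠ 5 else j ≠ 0) = (j ≠ 0) from if_neg (by norm_num),
             show (if (1:Int) < 0 then i ≠ 0 else i ≠ 5) = (i ≠ 5) from if_neg (by norm_num)]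
  rw [if_neg h]

lemma walkB_DR_blocker (board : List (List String)) (p o : String) (f : Nat) (i j : Int) (c : String)
    (hg : j ≠ 0 ∧ i ≠ 5) (hcell : cellB board (i + 1) (j + -1) = c) (hp : c ≠ p) :
    walkB board p o (f+1) 1 (-1) i j = (0, if c ≠ o ∧ c = "E" then 1 else 0, 1, []) := by
  rw [walkB]
  simp only [show (if (-1:Int) > 0 then j ≠ 5 else j ≠ 0) = (j ≠ 0) from if_neg (by norm_num),
             show (if (1:Int) < 0 then i ≠ 0 else i ≠ 5) = (i ≠ 5) from if_neg (by norm_num)]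
  rw [if_pos hg]
  simp only [hcell]
  rw [if_pos hp]

lemma walkB_DR_step (board : List (List String)) (p o : String) (f : Nat) (i j : Int)
    (hg : j ≠ 0 ∧ i ≠ 5) (hcell : cellB board (i + 1) (j + -1) = p) :
    walkB board p o (f+1) 1 (-1) i j
      = ((walkB board p o f 1 (-1) (i+1) (j-1)).1 + 1,
         (walkB board p o f 1 (-1) (i+1) (j-1)).2.1,
         (walkB board p o f 1 (-1) (i+1) (j-1)).2.2.1 + 1,
         (i, j) :: (walkB board p o f 1 (-1) (i+1) (j-1)).2.2.2) := by
  rw [walkB]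
  simp only [show (if (-1:Int) > 0 then j ≠ 5 else j ≠ 0) = (j ≠ 0) from if_neg (by norm_num),
             show (if (1:Int) < 0 then i ≠ 0 else i ≠ 5) = (i ≠ 5) from if_neg (by norm_num)]
  rw [if_pos hg]
  simp only [hcell]
  rw [if_neg (not_not_intro rfl)]
  rw [show j + (-1 : Int) = j - 1 by ring]

-- empties is a 0/1 flag
lemma walkB_emp (board : List (List String)) (p o : String) :
    ∀ (fuel : Nat) (di dj i j : Int),
      (walkB board p o fuel di dj i j).2.1 = 0 ∨ (walkB board p o fuel di dj i j).2.1 = 1 := by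
  intro fuel
  induction fuel with
  | zero => intro di dj i j; left; rfl
  | succ f ih =>
    intro di dj i j
    rw [walkB]
    split_ifs <;> first | (left; rfl) | (right; rfl) | (exact ih di dj (i + di) (j + dj))

lemma upCells_cons (x y : Int) (board : List (List String)) (h1 : 1 ≤ x) (h2 : y ≤ 4) :
    upCells x y board = cellAt board (x-1) (y+1) :: upCells (x-1) (y+1) board := by
  unfold upCells
  rw [PySem.List.pyRange_one, PySem.List.pyRange_one]
  have hn : (min x (5 - y) + 1 - 1).toNat = (min (x-1) (5 - (y+1)) + 1 - 1).toNat + 1 := by omega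
  rw [hn, List.range_succ_eq_map]
  simp only [List.map_cons, List.map_map]
  refine List.cons_eq_cons.mpr ⟨by norm_num, ?_⟩
  refine List.map_congr_left (fun a _ => ?_)
  simp only [Function.comp_apply]
  exact cellAt_congr board (by push_cast; ring) (by push_cast; ring)

lemma downCells_cons (x y : Int) (board : List (List String)) (h1 : x ≤ 4) (h2 : 1 ≤ y) :
    downCells x y board = cellAt board (x+1) (y-1) :: downCells (x+1) (y-1) board := by
  unfold downCells
  rw [PySem.List.pyRange_one, PySem.List.pyRange_one]
  have hn : (min (5 - x) y + 1 - 1).toNat = (min (5 - (x+1)) (y-1) + 1 - 1).toNat + 1 := by omega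
  rw [hn, List.range_succ_eq_map]
  simp only [List.map_cons, List.map_map]
  refine List.cons_eq_cons.mpr ⟨by norm_num, ?_⟩
  refine List.map_congr_left (fun a _ => ?_)
  simp only [Function.comp_apply]
  exact cellAt_congr board (by push_cast; ring) (by push_cast; ring)

lemma upCells_len_lt (x y : Int) (board : List (List String)) (hx : x ≤ 5) :
    (upCells x y board).length < 8 := by
  unfold upCells
  simp [PySem.List.length_pyRange_one]
  omega

lemma downCells_len_lt (x y : Int) (board : List (List String)) (hy : y ≤ 5) :
    (downCells x y board).length < 8 := by
  unfold downCells
  simp [PySem.List.length_pyRange_one]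
  omega

-- the strict case: A's first loop computes exactly B's walk in direction (-1, 1)
lemma UL_walk (board : List (List String)) (p o : String) :
    ∀ (fuel : Nat) (i j : Int), 0 ≤ i → i ≤ 5 → 0 ≤ j → j ≤ 5 →
    okRay (upCells i j board) p o = true →
    (upCells i j board).length < fuel →
    ∀ (counter dcc esc : Int) (coords : List (Int × Int)),
    loopUL board p o fuel i j counter dcc esc coords =
      (counter + (walkB board p o fuel (-1) 1 i j).2.2.1,
       dcc + (walkB board p o fuel (-1) 1 i j).1,
       esc + (walkB board p o fuel (-1) 1 i j).2.1,
       coords ++ (walkB board p o fuel (-1) 1 i j).2.2.2) := by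
  intro fuel
  induction fuel with
  | zero => intro i j _ _ _ _ _ hlt; omega
  | succ f ih =>
    intro i j hi0 hi5 hj0 hj5 hok hlt counter dcc esc coords
    by_cases hg : j ≠ 5 ∧ i ≠ 0
    · have hcons := upCells_cons i j board (by omega) (by omega)
      set c := cellAt board (i-1) (j+1) with hc
      have hcb : cellB board (i + -1) (j + 1) = c := by
        rw [cellB_eq_cellAt]
        exact cellAt_congr board (by ring) rfl
      rw [loopUL, if_pos hg]
      by_cases hp : c = p
      · rw [if_pos hp]
        have hok' : okRay (upCells (i-1) (j+1) board) p o = true := by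
          unfold okRay at hok ⊢
          rw [hcons] at hok
          simpa [hp, List.dropWhile] using hok
        rw [ih (i-1) (j+1) (by omega) (by omega) (by omega) (by omega) hok'
            (by rw [hcons] at hlt; simpa using hlt)]
        rw [walkB_UL_step board p o f i j hg (by rw [hcb]; exact hp)]
        simp only [Prod.mk.injEq]
        refine ⟨by ring, by ring, by trivial, by simp⟩
      · have hdrop : (upCells i j board).dropWhile (fun s => s == p) = upCells i j board := by
          have hbeq : (c == p) = false := beq_eq_false_iff_ne.mpr hp
          rw [hcons]; simp [List.dropWhile, hbeq]
        have hhead : c = o ∨ c = "E" := by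
          unfold okRay at hok
          rw [hdrop, hcons] at hok
          rcases Bool.or_eq_true_iff.mp hok with h | h
          · exact Or.inl (by simpa using h)
          · exact Or.inr (by simpa using h)
        rw [walkB_UL_blocker board p o f i j c hg hcb hp]
        rw [if_neg hp]
        by_cases ho : c = o
        · rw [if_pos ho]
          simp [ho]
        · have hE : c = "E" := by tauto
          have hne : ¬ ("E" : String) = o := by rw [← hE]; exact ho
          rw [if_neg ho, if_pos hE]
          simp [hE, hne]
    · rw [loopUL, if_neg hg, walkB_UL_idle board p o f i j hg]
      simp

-- the strict case: A's second loop computes exactly B's walk in direction (1, -1)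
lemma DR_walk (board : List (List String)) (p o : String) :
    ∀ (fuel : Nat) (i j : Int), 0 ≤ i → i ≤ 5 → 0 ≤ j → j ≤ 5 →
    okRay (downCells i j board) p o = true →
    (downCells i j board).length < fuel →
    ∀ (counter dcc esc : Int) (coords : List (Int × Int)),
    loopDR board p o fuel i j counter dcc esc coords =
      (counter + (walkB board p o fuel 1 (-1) i j).2.2.1,
       dcc + (walkB board p o fuel 1 (-1) i j).1,
       esc + (walkB board p o fuel 1 (-1) i j).2.1,
       coords ++ (walkB board p o fuel 1 (-1) i j).2.2.2) := by
  intro fuel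
  induction fuel with
  | zero => intro i j _ _ _ _ _ hlt; omega
  | succ f ih =>
    intro i j hi0 hi5 hj0 hj5 hok hlt counter dcc esc coords
    by_cases hg : j ≠ 0 ∧ i ≠ 5
    · have hcons := downCells_cons i j board (by omega) (by omega)
      set c := cellAt board (i+1) (j-1) with hc
      have hcb : cellB board (i + 1) (j + -1) = c := by
        rw [cellB_eq_cellAt]
        exact cellAt_congr board rfl (by ring)
      rw [loopDR, if_pos hg]
      by_cases hp : c = p
      · rw [if_pos hp]
        have hok' : okRay (downCells (i+1) (j-1) board) p o = true := by
          unfold okRay at hok ⊢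
          rw [hcons] at hok
          simpa [hp, List.dropWhile] using hok
        rw [ih (i+1) (j-1) (by omega) (by omega) (by omega) (by omega) hok'
            (by rw [hcons] at hlt; simpa using hlt)]
        rw [walkB_DR_step board p o f i j hg (by rw [hcb]; exact hp)]
        simp only [Prod.mk.injEq]
        refine ⟨by ring, by ring, by trivial, by simp⟩
      · have hdrop : (downCells i j board).dropWhile (fun s => s == p) = downCells i j board := by
          have hbeq : (c == p) = false := beq_eq_false_iff_ne.mpr hp
          rw [hcons]; simp [List.dropWhile, hbeq]
        have hhead : c = o ∨ c = "E" := by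
          unfold okRay at hok
          rw [hdrop, hcons] at hok
          rcases Bool.or_eq_true_iff.mp hok with h | h
          · exact Or.inl (by simpa using h)
          · exact Or.inr (by simpa using h)
        rw [walkB_DR_blocker board p o f i j c hg hcb hp]
        rw [if_neg hp]
        by_cases ho : c = o
        · rw [if_pos ho]
          simp [ho]
        · have hE : c = "E" := by tauto
          have hne : ¬ ("E" : String) = o := by rw [← hE]; exact ho
          rw [if_neg ho, if_pos hE]
          simp [hE, hne]
    · rw [loopDR, if_neg hg, walkB_DR_idle board p o f i j hg]
      simp

-- ===== VERDICT (by name: the statement is the Claim_ definition above) =====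
theorem check_diagonal_up_spec : Claim_equal_check_diagonal_up := by
  intro x y board p o _ hpre
  unfold Spec_check_diagonal_up check_diagonal_up check_diagonal_up_alt
  rcases hpre with ⟨hE1, hE2⟩ | ⟨hx0, hx5, hy0, hy5, hb, hr, hokU, hokD⟩
  · -- easy case: each direction is idle or stopped by its very first cell; dcc stays 1
    have h1 : ∃ a e1, loopUL board p o 8 x y 0 1 0 [(x, y)] = (a, 1, e1, [(x, y)])
        ∧ walkB board p o 8 (-1) 1 x y = (0, e1, a, []) := by
      rcases hE1 with hidle | hblk
      · exact ⟨0, 0, loopUL_idle board p o 7 x y 0 1 0 [(x, y)] hidle,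
          walkB_UL_idle board p o 7 x y hidle⟩
      · obtain ⟨c, hoc, hcp, hblk2⟩ := blockerOk_spec _ _ _ hblk
        by_cases hidle : ¬(y ≠ 5 ∧ x ≠ 0)
        · exact ⟨0, 0, loopUL_idle board p o 7 x y 0 1 0 [(x, y)] hidle,
            walkB_UL_idle board p o 7 x y hidle⟩
        · have hg : y ≠ 5 ∧ x ≠ 0 := not_not.mp hidle
          have hcell : cellAt board (x-1) (y+1) = c := cellAt_of_ocellAt board (x-1) (y+1) c hoc
          refine ⟨1, if c ≠ o ∧ c = "E" then 1 else 0, ?_, ?_⟩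
          · have := loopUL_blocker board p o 7 x y 0 1 0 [(x, y)] c hg hcell hcp hblk2
            simpa using this
          · exact walkB_UL_blocker board p o 7 x y c hg
              (by rw [cellB_eq_cellAt]; rw [← hcell]; exact cellAt_congr board (by ring) rfl) hcp
    have h2 : ∃ a e2, (∀ counter dcc esc coords, loopDR board p o 8 x y counter dcc esc coords = (counter + a, dcc, esc + e2, coords))
        ∧ walkB board p o 8 1 (-1) x y = (0, e2, a, []) := by
      rcases hE2 with hidle | hblk
      · refine ⟨0, 0, fun counter dcc esc coords => ?_, walkB_DR_idle board p o 7 x y hidle⟩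
        simpa using loopDR_idle board p o 7 x y counter dcc esc coords hidle
      · obtain ⟨c, hoc, hcp, hblk2⟩ := blockerOk_spec _ _ _ hblk
        by_cases hidle : ¬(y ≠ 0 ∧ x ≠ 5)
        · refine ⟨0, 0, fun counter dcc esc coords => ?_, walkB_DR_idle board p o 7 x y hidle⟩
          simpa using loopDR_idle board p o 7 x y counter dcc esc coords hidle
        · have hg : y ≠ 0 ∧ x ≠ 5 := not_not.mp hidle
          have hcell : cellAt board (x+1) (y-1) = c := cellAt_of_ocellAt board (x+1) (y-1) c hoc
          refine ⟨1, if c ≠ o ∧ c = "E" then 1 else 0, fun counter dcc esc coords => ?_, ?_⟩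
          · exact loopDR_blocker board p o 7 x y counter dcc esc coords c hg hcell hcp hblk2
          · exact walkB_DR_blocker board p o 7 x y c hg
              (by rw [cellB_eq_cellAt]; rw [← hcell]; exact cellAt_congr board rfl (by ring)) hcp
    obtain ⟨a1, e1, hA1, hB1⟩ := h1
    obtain ⟨a2, e2, hA2, hB2⟩ := h2
    rw [hA1]
    simp only
    rw [hA2 a1 1 e1 [(x, y)]]
    simp only [hB1, hB2]
    norm_num
  · -- strict case: a proper 6×6 board; both loops compute B's walks
    rw [UL_walk board p o 8 x y hx0 hx5 hy0 hy5 hokU (upCells_len_lt x y board hx5)]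
    simp only
    rw [DR_walk board p o 8 x y hx0 hx5 hy0 hy5 hokD (downCells_len_lt x y board hy5)]
    simp only
    have he1 := walkB_emp board p o 8 (-1) 1 x y
    have he2 := walkB_emp board p o 8 1 (-1) x y
    set r1 := (walkB board p o 8 (-1) 1 x y).1
    set e1 := (walkB board p o 8 (-1) 1 x y).2.1
    set s1 := (walkB board p o 8 (-1) 1 x y).2.2.1
    set c1 := (walkB board p o 8 (-1) 1 x y).2.2.2
    set r2 := (walkB board p o 8 1 (-1) x y).1
    set e2 := (walkB board p o 8 1 (-1) x y).2.1
    set s2 := (walkB board p o 8 1 (-1) x y).2.2.1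
    set c2 := (walkB board p o 8 1 (-1) x y).2.2.2
    have hcnt : (0 + s1) + s2 = s1 + s2 := by ring
    have hdcc : ((1 : Int) + r1) + r2 = 1 + r1 + r2 := by ring
    have hesc : ((0 : Int) + e1) + e2 = e1 + e2 := by ring
    have hlist : ([(x, y)] ++ c1) ++ c2 = [(x, y)] ++ c1 ++ c2 := by simp
    rw [hcnt, hdcc, hesc, hlist]
    split_ifs <;> first | rfl | (exfalso; omega)
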